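-- pv_equiv track=rewrite | github.com/why-26/agent-traj | compute_signals1.py | sig_consecutive_failure_count
-- ===== SOURCE A (Python) =====
-- def sig_consecutive_failure_count(steps):
--     """
--     连续调用同一 tool 且返回空/无效结果的最大次数
--     检测: Type B 机械重试型 (如 search_direct_flight 连续21次返回空)
--     """
--     max_streak = 0
--     current_streak = 0
--     prev_action = None
--
--     for s in steps:
--         action = s.get("action_type") or s.get("action", "") or ""
--         obs = s.get("observation") or ""
--
--         # 判断 observation 是否为空/无效
--         obs_stripped = obs.strip()
--         is_empty = (
--             obs_stripped in ["", "[]", "null", "None", "{}"] or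
--             len(obs_stripped) < 5 or
--             obs_stripped == "No results found" or
--             obs_stripped.startswith("Error")
--         )
--
--         if action and action == prev_action and is_empty:
--             current_streak += 1
--             max_streak = max(max_streak, current_streak)
--         else:
--             current_streak = 0
--         prev_action = action
--
--     return max_streak
-- ===== SOURCE B (Python) =====
-- def _runs(bs):
--     """Run-length encode a list of booleans into (value, length) pairs."""
--     out = []
--     if not bs:
--         return out
--     k, n = bs[0], 1
--     for b in bs[1:]:
--         if b == k:
--             n += 1
--         else:
--             out.append((k, n))
--             k, n = b, 1
--     out.append((k, n))
--     return out
--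
-- def sig_consecutive_failure_count(steps):
--     # pass 1: feature table (action, is_empty) per step
--     feats = []
--     for s in steps:
--         action = s.get("action_type") or s.get("action", "") or ""
--         obs = (s.get("observation") or "").strip()
--         is_empty = (obs in ["", "[]", "null", "None", "{}"] or
--                     len(obs) < 5 or
--                     obs == "No results found" or
--                     obs.startswith("Error"))
--         feats.append((action, is_empty))
--     # pass 2: continues[i] = step i extends a same-action empty streak
--     continues = ([False] + [a != "" and a == pa and e
--                             for (pa, _), (a, e) in zip(feats, feats[1:])]
--                  if feats else [])
--     # pass 3: longest run of True
--     best = 0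
--     for k, n in _runs(continues):
--         if k and n > best:
--             best = n
--     return best
-- ===== Notes on version B (the rewrite author's own statement) =====
-- stated objective: alternative
-- what changed: Replaces A's fused running-counter loop (max/current streak/prev_action carried together) by three passes: build a per-step (action, is_empty) feature table, derive a boolean 'continues' list from adjacent pairs, run-length-encode it and take the longest True run.
import Mathlib
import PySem

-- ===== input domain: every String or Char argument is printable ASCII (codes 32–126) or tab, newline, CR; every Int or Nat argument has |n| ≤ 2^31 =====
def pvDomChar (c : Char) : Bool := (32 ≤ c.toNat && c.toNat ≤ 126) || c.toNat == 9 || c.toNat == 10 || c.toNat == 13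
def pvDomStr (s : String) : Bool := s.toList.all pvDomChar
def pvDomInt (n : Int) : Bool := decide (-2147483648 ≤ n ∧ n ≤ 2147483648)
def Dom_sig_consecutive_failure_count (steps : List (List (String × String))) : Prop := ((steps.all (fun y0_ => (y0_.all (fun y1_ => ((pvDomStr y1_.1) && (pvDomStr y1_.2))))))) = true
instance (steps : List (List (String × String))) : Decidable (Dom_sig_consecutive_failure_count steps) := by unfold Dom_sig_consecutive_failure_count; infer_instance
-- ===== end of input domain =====

-- B replaces A's fused running-counter loop by a feature table + run-length-encoding scan (objective: alternative decomposition, same cost).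

-- ===== PORT A =====
-- shared with Port B: both Pythons compute action/observation-emptiness with these exact expressions
-- s.get("action_type") or s.get("action", "") or ""
def pyAction (s : List (String × String)) : String :=
  let v1 := (PySem.Dict.mk s).get? "action_type"
  let v2 := (PySem.Dict.mk s).getD "action" ""
  match v1 with
  | some a => if a ≠ "" then a else (if v2 ≠ "" then v2 else "")
  | none => if v2 ≠ "" then v2 else ""

-- obs = s.get("observation") or ""; then the empty/invalid predicate on obs.strip()
def pyIsEmpty (s : List (String × String)) : Bool :=
  let obs : String :=
    match (PySem.Dict.mk s).get? "observation" with
    | some o => if o ≠ "" then o else ""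
    | none => ""
  let t := PySem.Str.strip obs
  (["", "[]", "null", "None", "{}"].contains t) ||
    decide ((PySem.Str.len t : Int) < 5) ||
    (t == "No results found") ||
    PySem.Str.startswith t "Error"

-- A's loop body: state = (max_streak, current_streak, prev_action)
def stepA (st : Int × Int × Option String) (s : List (String × String)) :
    Int × Int × Option String :=
  let action := pyAction s
  let isEmpty := pyIsEmpty s
  if decide (action ≠ "") && (st.2.2 == some action) && isEmpty then
    (max st.1 (st.2.1 + 1), st.2.1 + 1, some action)
  else
    (st.1, 0, some action)

def sig_consecutive_failure_count (steps : List (List (String × String))) : Int :=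
  (steps.foldl stepA ((0 : Int), (0 : Int), (none : Option String))).1

-- ===== PORT B =====
-- _runs: run-length encoding of a boolean list (Source B's _runs helper)
def runsGoB (k : Bool) (n : Int) : List Bool → List (Bool × Int)
  | [] => [(k, n)]
  | b :: bs => if b == k then runsGoB k (n + 1) bs else (k, n) :: runsGoB b 1 bs

def runsB : List Bool → List (Bool × Int)
  | [] => []
  | b :: bs => runsGoB b 1 bs

-- continues[0] = False; continues[i] = a≠"" and a == previous action and is_empty
def contsOf (feats : List (String × Bool)) : List Bool :=
  match feats with
  | [] => []
  | _ :: _ =>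
      false :: (feats.zip feats.tail).map
        (fun pq => decide (pq.2.1 ≠ "") && (pq.2.1 == pq.1.1) && pq.2.2)

def sig_consecutive_failure_count_alt (steps : List (List (String × String))) : Int :=
  let feats := steps.map (fun s => (pyAction s, pyIsEmpty s))
  let continues := contsOf feats
  (runsB continues).foldl
    (fun best kn => if kn.1 && decide (kn.2 > best) then kn.2 else best) 0

-- ===== PRECONDITION & SPEC =====
def Spec_sig_consecutive_failure_count (steps : List (List (String × String))) (out : Int) : Prop := out = sig_consecutive_failure_count_alt steps
instance (steps : List (List (String × String))) (out : Int) : Decidable (Spec_sig_consecutive_failure_count steps out) := by unfold Spec_sig_consecutive_failure_count; infer_instance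

-- ===== CLAIM (what is proved, stated in full; the proofs are below) =====
def Claim_equal_sig_consecutive_failure_count : Prop := ∀ (steps : List (List (String × String))), Dom_sig_consecutive_failure_count steps → Spec_sig_consecutive_failure_count steps (sig_consecutive_failure_count steps)

-- ===== LEMMAS AND PROOFS =====

-- reference function: N c bs = best streak value reached when scanning bs with current streak c
def refN : Int → List Bool → Int
  | _, [] => 0
  | c, true :: bs => max (c + 1) (refN (c + 1) bs)
  | _, false :: bs => refN 0 bs

theorem refN_nonneg (c : Int) (bs : List Bool) : 0 ≤ refN c bs := by
  induction bs generalizing c with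
  | nil => simp [refN]
  | cons b bs ih =>
    cases b <;> simp [refN]
    · exact ih 0
    · exact Or.inr (ih (c + 1))

-- the continues bits A's loop effectively scans, given the running prev_action
def contsP : Option String → List (List (String × String)) → List Bool
  | _, [] => []
  | prev, s :: ss =>
      (decide (pyAction s ≠ "") && (prev == some (pyAction s)) && pyIsEmpty s)
        :: contsP (some (pyAction s)) ss

theorem aLoop_eq (steps : List (List (String × String))) (m c : Int)
    (prev : Option String) (hm : 0 ≤ m) :
    (steps.foldl stepA (m, c, prev)).1 = max m (refN c (contsP prev steps)) := by
  induction steps generalizing m c prev with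
  | nil => simp [contsP, refN, max_eq_left hm]
  | cons s ss ih =>
    simp only [List.foldl, contsP]
    by_cases h : (decide (pyAction s ≠ "") && (prev == some (pyAction s)) && pyIsEmpty s) = true
    · rw [h]
      simp only [stepA, h, if_true]
      rw [ih (max m (c + 1)) (c + 1) (some (pyAction s)) (le_trans hm (le_max_left _ _))]
      simp only [refN]
      rw [max_assoc]
    · rw [Bool.not_eq_true] at h
      rw [h]
      simp only [stepA, h, Bool.false_eq_true, if_false]
      rw [ih m 0 (some (pyAction s)) hm]
      simp only [refN]

-- bridge: B's zip-built continues list equals contsP from prev = none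
theorem contsOf_tail_eq (a0 : String) (e0 : Bool)
    (ss : List (List (String × String))) :
    (((a0, e0) :: ss.map (fun s => (pyAction s, pyIsEmpty s))).zip
        (ss.map (fun s => (pyAction s, pyIsEmpty s)))).map
      (fun pq => decide (pq.2.1 ≠ "") && (pq.2.1 == pq.1.1) && pq.2.2)
      = contsP (some a0) ss := by
  induction ss generalizing a0 e0 with
  | nil => simp [contsP]
  | cons s1 ss ih =>
    simp only [List.map, contsP]
    rw [List.zip_cons_cons, List.map, ih]
    congr 1
    have : ((pyAction s1 == a0) : Bool) = (some a0 == some (pyAction s1)) := by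
      simp [BEq.comm]
    rw [this]

theorem contsOf_eq (steps : List (List (String × String))) :
    contsOf (steps.map (fun s => (pyAction s, pyIsEmpty s))) = contsP none steps := by
  cases steps with
  | nil => rfl
  | cons s ss =>
    simp only [List.map, contsOf, contsP]
    congr 1
    · simp
    · exact contsOf_tail_eq (pyAction s) (pyIsEmpty s) ss

-- B's fold over the run-length encoding computes refN
theorem foldB_step (acc : Int) (k : Bool) (n : Int) (rest : List (Bool × Int)) :
    (((k, n) :: rest).foldl
      (fun best kn => if kn.1 && decide (kn.2 > best) then kn.2 else best) acc)
    = rest.foldl (fun best kn => if kn.1 && decide (kn.2 > best) then kn.2 else best)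
        (if k then max acc n else acc) := by
  simp only [List.foldl]
  congr 1
  cases k
  · simp
  · simp [max_def]; split_ifs <;> omega

theorem foldB_runsGo (bs : List Bool) (k : Bool) (n acc : Int)
    (hacc : 0 ≤ acc) (hn : 0 ≤ n) :
    ((runsGoB k n bs).foldl
      (fun best kn => if kn.1 && decide (kn.2 > best) then kn.2 else best) acc)
    = if k then max (max acc n) (refN n bs) else max acc (refN 0 bs) := by
  induction bs generalizing k n acc with
  | nil =>
    simp only [runsGoB, foldB_step, List.foldl, refN]
    cases k
    · simp [max_eq_left hacc]
    · simp
      rw [max_eq_left hn]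
  | cons b bs ih =>
    simp only [runsGoB]
    by_cases hbk : b = k
    · subst hbk
      simp only [BEq.rfl, if_true]
      rw [ih b (n + 1) acc hacc (by omega)]
      cases b <;> simp only [refN, if_true, Bool.false_eq_true, if_false]
      omega
    · have : (b == k) = false := by simp [hbk]
      rw [this]
      simp only [Bool.false_eq_true, if_false, foldB_step]
      rw [ih b 1 _ (by cases k <;> simp [hacc]) (by omega)]
      cases k <;> cases b <;> simp_all [refN] <;> omega

theorem foldB_runs (bs : List Bool) :
    ((runsB bs).foldl
      (fun best kn => if kn.1 && decide (kn.2 > best) then kn.2 else best) 0)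
    = refN 0 bs := by
  cases bs with
  | nil => rfl
  | cons b bs =>
    simp only [runsB]
    rw [foldB_runsGo bs b 1 0 le_rfl (by omega)]
    cases b <;> simp [refN]
    · exact refN_nonneg 0 bs

-- ===== VERDICT (by name: the statement is the Claim_ definition above) =====
theorem sig_consecutive_failure_count_spec : Claim_equal_sig_consecutive_failure_count := by
  intro steps _
  unfold Spec_sig_consecutive_failure_count
  unfold sig_consecutive_failure_count sig_consecutive_failure_count_alt
  rw [aLoop_eq steps 0 0 none le_rfl]
  simp only []
  rw [contsOf_eq, foldB_runs]
  exact max_eq_right (refN_nonneg 0 _)
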